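-- pv_equiv track=rewrite | github.com/Oktosha/codam-push_swap | handwaiwing.py | estimate_min_worst_case_length
-- ===== SOURCE A (Python) =====
-- import math
--
-- def estimate_min_worst_case_length(data_length: int) -> int:
--     n_possible_input_sequences = math.factorial(data_length)
--     n_answer_sequences = 1
--     min_worst_case_length = 0
--     possible_operations = 11
--     while n_answer_sequences < n_possible_input_sequences:
--         min_worst_case_length += 1
--         n_answer_sequences += possible_operations ** min_worst_case_length
--     return min_worst_case_length
-- ===== SOURCE B (Python) =====
-- import math
--
-- def estimate_min_worst_case_length(data_length: int) -> int:
--     f = math.factorial(data_length)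
--     if f <= 1:
--         return 0
--
--     def s(L):
--         # closed-form geometric sum 1 + 11 + ... + 11**L
--         return (11 ** (L + 1) - 1) // 10
--
--     hi = 1
--     while s(hi) < f:
--         hi *= 2
--     lo = 0
--     while lo < hi:
--         mid = (lo + hi) // 2
--         if s(mid) >= f:
--             hi = mid
--         else:
--             lo = mid + 1
--     return lo
-- ===== Notes on version B (the rewrite author's own statement) =====
-- stated objective: faster
-- what changed: Replaces A's linear accumulation loop (adding 11**L term by term until the running geometric sum reaches n!) by the closed-form geometric sum with exponential doubling plus binary search for the smallest qualifying L.
import Mathlib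
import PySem

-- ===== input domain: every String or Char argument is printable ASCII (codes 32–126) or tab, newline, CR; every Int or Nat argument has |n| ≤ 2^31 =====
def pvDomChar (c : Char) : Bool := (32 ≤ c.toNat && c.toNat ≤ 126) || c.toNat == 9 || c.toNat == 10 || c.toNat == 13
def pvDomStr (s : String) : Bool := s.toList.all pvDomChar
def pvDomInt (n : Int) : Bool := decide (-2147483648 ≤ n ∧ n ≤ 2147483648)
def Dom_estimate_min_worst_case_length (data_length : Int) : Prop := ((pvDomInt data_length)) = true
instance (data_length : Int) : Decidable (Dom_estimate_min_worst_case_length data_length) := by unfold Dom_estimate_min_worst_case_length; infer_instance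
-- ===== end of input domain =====

-- B replaces A's linear geometric-sum accumulation by a closed-form sum with exponential + binary search (faster).


-- ===== PORT A =====
-- the while loop: state (n_answer_sequences, min_worst_case_length)
def pvLoopA (f acc : Int) (L : Nat) : Int :=
  if acc < f then pvLoopA f (acc + 11 ^ (L + 1)) (L + 1) else (L : Int)
termination_by (f - acc).toNat
decreasing_by
  have h1 : (0:Int) < 11 ^ (L + 1) := by positivity
  omega

def estimate_min_worst_case_length (data_length : Int) : Int :=
  pvLoopA ((Nat.factorial data_length.toNat : Nat) : Int) 1 0

-- ===== PORT B =====
-- closed-form geometric sum s(L) = (11**(L+1) - 1) // 10 from Source B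
def pvS (L : Nat) : Int := PySem.Int.floordiv (11 ^ (L + 1) - 1) 10

-- proof-side reference sum 1 + 11 + ... + 11^L (needed by pvExpand's termination)
def pvGsum : Nat → Int
  | 0 => 1
  | n + 1 => pvGsum n + 11 ^ (n + 1)

theorem pvGsum_mul (L : Nat) : 10 * pvGsum L = 11 ^ (L + 1) - 1 := by
  induction L with
  | zero => simp [pvGsum]
  | succ n ih => simp [pvGsum, mul_add, ih, pow_succ]; ring

theorem pvS_eq (L : Nat) : pvS L = pvGsum L := by
  have h := pvGsum_mul L
  unfold pvS
  rw [← h, PySem.Int.floordiv_eq_ediv_of_pos (by norm_num)]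
  exact Int.mul_ediv_cancel_left _ (by norm_num)

theorem pvGsum_lt {m n : Nat} (h : m < n) : pvGsum m < pvGsum n := by
  have : StrictMono pvGsum := by
    apply strictMono_nat_of_lt_succ
    intro k
    have : (0:Int) < 11 ^ (k + 1) := by positivity
    simp only [pvGsum]
    omega
  exact this h

theorem pvS_lt {m n : Nat} (h : m < n) : pvS m < pvS n := by
  rw [pvS_eq, pvS_eq]; exact pvGsum_lt h

-- while s(hi) < f: hi *= 2   (hi starts at 1, so 1 ≤ hi throughout)
def pvExpand (f : Int) (hi : Nat) (h : 1 ≤ hi) : Nat :=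
  if pvS hi < f then pvExpand f (hi * 2) (by omega) else hi
termination_by (f - pvS hi).toNat
decreasing_by
  have h2 : pvS hi < pvS (hi * 2) := pvS_lt (by omega)
  omega

-- binary search for the smallest L in [lo, hi] with s(L) >= f
def pvBsearch (f : Int) (lo hi : Nat) : Nat :=
  if lo < hi then
    let mid := (lo + hi) / 2
    if f ≤ pvS mid then pvBsearch f lo mid else pvBsearch f (mid + 1) hi
  else lo
termination_by hi - lo
decreasing_by all_goals omega

def estimate_min_worst_case_length_alt (data_length : Int) : Int :=
  let f : Int := (Nat.factorial data_length.toNat : Nat)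
  if f ≤ 1 then 0
  else (pvBsearch f 0 (pvExpand f 1 (by omega)) : Int)

-- ===== PRECONDITION & SPEC =====
-- Pre_ excludes negative inputs, on which Python's math.factorial raises ValueError in both A and B.
def Pre_estimate_min_worst_case_length (data_length : Int) : Prop := 0 ≤ data_length
instance (data_length : Int) : Decidable (Pre_estimate_min_worst_case_length data_length) := by unfold Pre_estimate_min_worst_case_length; infer_instance

def pvWitness_estimate_min_worst_case_length : Int := 5

def Spec_estimate_min_worst_case_length (data_length : Int) (out : Int) : Prop := out = estimate_min_worst_case_length_alt data_length
instance (data_length : Int) (out : Int) : Decidable (Spec_estimate_min_worst_case_length data_length out) := by unfold Spec_estimate_min_worst_case_length; infer_instance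

-- ===== CLAIM (what is proved, stated in full; the proofs are below) =====
def Claim_equal_estimate_min_worst_case_length : Prop := ∀ (data_length : Int), Dom_estimate_min_worst_case_length data_length → Pre_estimate_min_worst_case_length data_length → Spec_estimate_min_worst_case_length data_length (estimate_min_worst_case_length data_length)

-- ===== LEMMAS AND PROOFS =====

-- a result is "good" when it is the least L with f ≤ gsum L
def pvGood (f : Int) (r : Nat) : Prop := f ≤ pvGsum r ∧ ∀ k < r, pvGsum k < f

theorem pvGood_unique {f : Int} {r₁ r₂ : Nat} (h₁ : pvGood f r₁) (h₂ : pvGood f r₂) : r₁ = r₂ := by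
  rcases lt_trichotomy r₁ r₂ with h | h | h
  · exact absurd h₁.1 (not_le.mpr (h₂.2 _ h))
  · exact h
  · exact absurd h₂.1 (not_le.mpr (h₁.2 _ h))

theorem pvLoopA_good (f : Int) (acc : Int) (L : Nat) :
    acc = pvGsum L → (∀ k < L, pvGsum k < f) →
    ∃ r : Nat, pvLoopA f acc L = (r : Int) ∧ pvGood f r := by
  fun_induction pvLoopA f acc L with
  | case1 acc L hcond ih =>
    intro hacc hlt
    refine ih (by simp [pvGsum, hacc]) ?_
    intro k hk
    rcases Nat.lt_succ_iff_lt_or_eq.mp hk with h | h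
    · exact hlt _ h
    · subst h; omega
  | case2 acc L hcond =>
    intro hacc hlt
    exact ⟨L, rfl, by constructor <;> [omega; exact hlt]⟩

theorem pvExpand_good (f : Int) (hi : Nat) (h : 1 ≤ hi) :
    f ≤ pvGsum (pvExpand f hi h) := by
  fun_induction pvExpand f hi h with
  | case1 hi h hcond ih => exact ih
  | case2 hi h hcond => rw [← pvS_eq]; omega

theorem pvBsearch_good (f : Int) (lo hi : Nat) :
    lo ≤ hi → (∀ k < lo, pvGsum k < f) → f ≤ pvGsum hi →
    pvGood f (pvBsearch f lo hi) := by
  fun_induction pvBsearch f lo hi with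
  | case1 lo hi hlt mid hmid ih =>
    intro hle hlo hhi
    exact ih (by omega) hlo (by rw [← pvS_eq]; exact hmid)
  | case2 lo hi hlt mid hmid ih =>
    intro hle hlo hhi
    refine ih (by omega) ?_ hhi
    intro k hk
    have hm : pvGsum mid < f := by rw [← pvS_eq]; omega
    rcases Nat.lt_succ_iff_lt_or_eq.mp hk with h | h
    · have := pvGsum_lt h; omega
    · subst h; exact hm
  | case3 lo hi hlt =>
    intro hle hlo hhi
    have heq : lo = hi := by omega
    exact ⟨heq ▸ hhi, hlo⟩

theorem pvEstimate_key (f : Int) :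
    pvLoopA f 1 0 = (if f ≤ 1 then (0:Int) else (pvBsearch f 0 (pvExpand f 1 (by omega)) : Int)) := by
  by_cases h1 : f ≤ 1
  · rw [if_pos h1, pvLoopA]
    simp [show ¬ (1 < f) by omega]
  · rw [if_neg h1]
    have h1' : 1 < f := by omega
    obtain ⟨r, hr, hgood⟩ := pvLoopA_good f 1 0 (by simp [pvGsum])
      (by intro k hk; exact absurd hk (Nat.not_lt_zero k))
    rw [hr]
    congr 1
    exact pvGood_unique hgood
      (pvBsearch_good f 0 _ (by omega) (by intro k hk; exact absurd hk (Nat.not_lt_zero k))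
        (pvExpand_good f 1 (by omega)))

-- ===== VERDICT (by name: the statement is the Claim_ definition above) =====
theorem estimate_min_worst_case_length_spec : Claim_equal_estimate_min_worst_case_length := by
  intro d _ _
  exact pvEstimate_key ((Nat.factorial d.toNat : Nat) : Int)
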